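-- pv_equiv track=rewrite | github.com/ucbrise/risecamp | autopandas/tutorial/string_models.py | encode_strings_as_graphs
-- ===== SOURCE A (Python) =====
-- import collections
--
-- def encode_strings_as_graphs(strlist):
--     nodes = []
--     adjacency_edges = []
--     equality_edges = []
--
--     equality_maps = []
--     for idx, s in enumerate(strlist):
--         embedding = [0] * len(strlist)
--         embedding[idx] = 1
--         new_nodes = [embedding + [int(c.isalpha())] for c in s]
--         for i in range(len(nodes), len(nodes) + len(s) - 1):
--             adjacency_edges.append([i, i + 1])
--
--         eq_map = collections.defaultdict(list)
--         for n_idx, c in enumerate(s, len(nodes)):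
--             eq_map[c].append(n_idx)
--
--         nodes.extend(new_nodes)
--         equality_maps.append(eq_map)
--
--     for m1 in equality_maps:
--         for m2 in equality_maps:
--             if m1 is m2:
--                 continue
--
--             for k, v in m1.items():
--                 equality_edges.extend([[i, j] for i in v for j in m2[k]])
--
--     return nodes, adjacency_edges, equality_edges
-- ===== SOURCE B (Python) =====
-- def encode_strings_as_graphs(strlist):
--     n = len(strlist)
--     nodes = []
--     adjacency_edges = []
--     occs = []   # per string: dict char -> list of node indices (first-occurrence key order)
--     index = {}  # global char index: char -> list of (string_idx, node-index list), string_idx ascending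
--     for idx, s in enumerate(strlist):
--         base = len(nodes)
--         row = [0] * n
--         row[idx] = 1
--         d = {}
--         for p, c in enumerate(s):
--             nodes.append(row + [1 if c.isalpha() else 0])
--             if p:
--                 adjacency_edges.append([base + p - 1, base + p])
--             d.setdefault(c, []).append(base + p)
--         for c, v in d.items():
--             index.setdefault(c, []).append((idx, v))
--         occs.append(d)
--
--     equality_edges = []
--     for a, da in enumerate(occs):
--         # bucket the edges from string a per target string, then flush in target order
--         buckets = [[] for _ in range(n)]
--         for k, v in da.items():
--             for b, w in index[k]:
--                 if b != a:
--                     buckets[b].extend([i, j] for i in v for j in w)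
--         for bucket in buckets:
--             equality_edges.extend(bucket)
--     return nodes, adjacency_edges, equality_edges
-- ===== Notes on version B (the rewrite author's own statement) =====
-- stated objective: faster
-- what changed: B builds everything in one pass per string plus a global char->(string,positions) index, then for each source string buckets equality edges per target string (visiting only strings that actually share the char) and flushes buckets in target order, instead of A's all-pairs-of-strings loop that probes every key of every other string.
import Mathlib
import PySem

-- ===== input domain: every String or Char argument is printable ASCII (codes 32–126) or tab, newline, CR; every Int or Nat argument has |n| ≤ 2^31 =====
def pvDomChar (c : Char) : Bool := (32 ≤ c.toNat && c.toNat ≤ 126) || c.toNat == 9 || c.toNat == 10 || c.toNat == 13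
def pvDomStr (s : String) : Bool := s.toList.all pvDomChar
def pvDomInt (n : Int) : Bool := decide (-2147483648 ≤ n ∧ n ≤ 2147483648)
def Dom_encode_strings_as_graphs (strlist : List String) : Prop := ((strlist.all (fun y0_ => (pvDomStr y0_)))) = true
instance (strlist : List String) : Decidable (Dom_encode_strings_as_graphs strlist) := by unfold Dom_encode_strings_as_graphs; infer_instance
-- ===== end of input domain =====

-- B replaces A's all-pairs equality-edge loop by a global char->(string, positions) index with per-target buckets; same return value, proved equal.

-- ===== PORT A =====
-- one iteration of A's outer 'for idx, s in enumerate(strlist)'; p = (idx, s), state = (nodes, adjacency_edges, equality_maps)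
-- 'embedding[idx] = 1' is pySetD (idx is the enumerate counter, always in range).
def pvAStep (n : Nat) (st : List (List Int) × List (List Int) × List (PySem.Dict Char (List Int)))
    (p : Int × String) : List (List Int) × List (List Int) × List (PySem.Dict Char (List Int)) :=
  let embedding := PySem.List.pySetD (List.replicate n (0 : Int)) p.1 1
  let new_nodes := p.2.toList.map (fun c => embedding ++ [if PySem.Chars.isalpha c then (1 : Int) else 0])
  let adj := (PySem.List.pyRange (PySem.List.len st.1) (PySem.List.len st.1 + PySem.Str.len p.2 - 1) 1).foldl
      (fun a i => a ++ [[i, i + 1]]) st.2.1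
  let eq_map := (PySem.List.enumerate p.2.toList (PySem.List.len st.1)).foldl
      (fun d q => d.modify q.2 [] (· ++ [q.1])) PySem.Dict.empty
  (st.1 ++ new_nodes, adj, st.2.2 ++ [eq_map])

-- 'm1 is m2' compares object identity: the eq_maps are freshly built per string, so it is position equality,
-- ported by comparing the two enumerate counters.  The defaultdict read 'm2[k]' can insert an EMPTY entry into
-- m2; such entries never change any returned value (an empty value list yields no pairs, and the inserted value
-- equals the default later reads get), so the port reads with getD [] and does not thread those insertions.
def encode_strings_as_graphs (strlist : List String) : List (List Int) × List (List Int) × List (List Int) :=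
  let st := (PySem.List.enumerate strlist 0).foldl (pvAStep strlist.length) ([], [], [])
  let eq := (PySem.List.enumerate st.2.2 0).foldl (fun acc q1 =>
      (PySem.List.enumerate st.2.2 0).foldl (fun acc q2 =>
        if q1.1 = q2.1 then acc
        else q1.2.items.foldl (fun acc kv =>
          acc ++ kv.2.flatMap (fun i => (q2.2.getD kv.1 []).map (fun j => [i, j]))) acc) acc) []
  (st.1, st.2.1, eq)

-- ===== PORT B =====
-- one iteration of B's outer loop; state = (nodes, adjacency_edges, occs, index)
def pvBStep (n : Nat)
    (st : List (List Int) × List (List Int) × List (PySem.Dict Char (List Int)) × PySem.Dict Char (List (Int × List Int)))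
    (p : Int × String) :
    List (List Int) × List (List Int) × List (PySem.Dict Char (List Int)) × PySem.Dict Char (List (Int × List Int)) :=
  let base := PySem.List.len st.1
  let row := PySem.List.pySetD (List.replicate n (0 : Int)) p.1 1
  -- the single 'for p, c in enumerate(s)' pass building nodes, adjacency and d together
  let inner := (PySem.List.enumerate p.2.toList 0).foldl
    (fun (t : List (List Int) × List (List Int) × PySem.Dict Char (List Int)) q =>
      (t.1 ++ [row ++ [if PySem.Chars.isalpha q.2 then (1 : Int) else 0]],
       (if q.1 ≠ 0 then t.2.1 ++ [[base + q.1 - 1, base + q.1]] else t.2.1),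
       t.2.2.modify q.2 [] (· ++ [base + q.1])))
    (st.1, st.2.1, PySem.Dict.empty)
  let index := inner.2.2.items.foldl (fun ix kv => ix.modify kv.1 [] (· ++ [(p.1, kv.2)])) st.2.2.2
  (inner.1, inner.2.1, st.2.2.1 ++ [inner.2.2], index)

-- 'index[k]' never raises (every key of an occ dict was registered in index), ported as getD [];
-- 'buckets[b]' access/extend is pyGetD/pySetD (b is a string index, always in range);
-- the final flush 'for bucket in buckets: equality_edges.extend(bucket)' is the foldl appending each bucket.
def encode_strings_as_graphs_alt (strlist : List String) : List (List Int) × List (List Int) × List (List Int) :=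
  let n := strlist.length
  let st := (PySem.List.enumerate strlist 0).foldl (pvBStep n) ([], [], [], PySem.Dict.empty)
  let eq := (PySem.List.enumerate st.2.2.1 0).foldl (fun acc q =>
      let buckets := q.2.items.foldl (fun bk kv =>
          (st.2.2.2.getD kv.1 []).foldl (fun bk bw =>
            if bw.1 ≠ q.1 then
              PySem.List.pySetD bk bw.1
                (PySem.List.pyGetD bk bw.1 [] ++ kv.2.flatMap (fun i => bw.2.map (fun j => [i, j])))
            else bk) bk)
        (List.replicate n ([] : List (List Int)))
      buckets.foldl (fun acc b => acc ++ b) acc) []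
  (st.1, st.2.1, eq)

-- ===== PRECONDITION & SPEC =====
def Spec_encode_strings_as_graphs (strlist : List String) (out : List (List Int) × List (List Int) × List (List Int)) : Prop := out = encode_strings_as_graphs_alt strlist
instance (strlist : List String) (out : List (List Int) × List (List Int) × List (List Int)) : Decidable (Spec_encode_strings_as_graphs strlist out) := by unfold Spec_encode_strings_as_graphs; infer_instance

-- ===== CLAIM (what is proved, stated in full; the proofs are below) =====
def Claim_equal_encode_strings_as_graphs : Prop := ∀ (strlist : List String), Dom_encode_strings_as_graphs strlist → Spec_encode_strings_as_graphs strlist (encode_strings_as_graphs strlist)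


-- ===== LEMMAS AND PROOFS =====

-- specification of B's global index: for a char c, the strings containing c with their node lists, in order
def cIndex (maps : List (PySem.Dict Char (List Int))) (c : Char) : List (Int × List Int) :=
  ((PySem.List.enumerate maps 0).filter (fun q => q.2.contains c)).map (fun q => (q.1, q.2.getD c []))

-- enumerate with a shifted start
theorem enumerate_shift (s : List Char) (a : Int) : ∀ b : Int,
    PySem.List.enumerate s (a + b) = (PySem.List.enumerate s b).map (fun q => (a + q.1, q.2)) := by
  induction s with
  | nil => intro b; simp [PySem.List.enumerate_nil]
  | cons c t ih =>
      intro b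
      rw [PySem.List.enumerate_cons, PySem.List.enumerate_cons]
      simp only [List.map_cons]
      rw [add_assoc a b 1, ih (b + 1)]

-- items of a dict with Nodup keys, filtered to one key
theorem items_filter_key {κ ν : Type} [BEq κ] [LawfulBEq κ] [DecidableEq κ]
    (d : PySem.Dict κ ν) (hnd : d.keys.Nodup) (c : κ) (d0 : ν) :
    d.items.filter (fun pr => pr.1 == c) =
      (if d.contains c then [(c, d.getD c d0)] else []) := by
  by_cases hc : d.contains c
  · rw [if_pos hc]
    have hmem : c ∈ d.keys := (PySem.Dict.contains_iff_mem_keys d c).mp hc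
    rw [PySem.Dict.items_eq_map_keys d hnd d0, List.filter_map]
    have hfc : d.keys.filter ((fun pr : κ × ν => pr.1 == c) ∘ (fun k => (k, d.getD k d0)))
        = d.keys.filter (fun k => k == c) := by
      apply List.filter_congr; intro x _; rfl
    rw [hfc, List.filter_beq, List.count_eq_one_of_mem hnd hmem]
    rfl
  · rw [if_neg hc]
    rw [List.filter_eq_nil_iff]
    intro pr hpr
    have : pr.1 ∈ d.keys := PySem.Dict.mem_keys_of_mem_items d hpr
    intro hbeq
    exact hc ((PySem.Dict.contains_iff_mem_keys d c).mpr (by rwa [eq_of_beq hbeq] at this))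

-- a fold over a triple of independent accumulators is three folds
theorem fold3_proj {α β γ ε : Type} (l : List ε)
    (f1 : α → ε → α) (f2 : β → ε → β) (f3 : γ → ε → γ) :
    ∀ (x : α) (y : β) (z : γ),
      l.foldl (fun t q => (f1 t.1 q, f2 t.2.1 q, f3 t.2.2 q)) (x, y, z)
        = (l.foldl f1 x, l.foldl f2 y, l.foldl f3 z) := by
  induction l with
  | nil => intro x y z; rfl
  | cons e t ih => intro x y z; simp only [List.foldl_cons]; exact ih _ _ _

-- B's fused adjacency pass produces exactly A's range of edges
theorem adj_maps_eq (s : List Char) (base : Int) :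
    ((PySem.List.enumerate s 0).filter (fun q => decide (q.1 ≠ 0))).map
        (fun q => [base + q.1 - 1, base + q.1])
      = (PySem.List.pyRange base (base + (s.length : Int) - 1) 1).map (fun i => [i, i + 1]) := by
  cases s with
  | nil =>
      simp only [List.length_nil, Nat.cast_zero]
      rw [PySem.List.pyRange_one_eq_nil (by omega)]
      simp [PySem.List.enumerate_nil]
  | cons c t =>
      rw [PySem.List.enumerate_cons]
      have h01 : (0 : Int) + 1 = 1 := by omega
      rw [h01]
      rw [List.filter_cons_of_neg (by simp)]
      have hself : (PySem.List.enumerate t 1).filter (fun q => decide (q.1 ≠ 0))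
          = PySem.List.enumerate t 1 := by
        apply List.filter_eq_self.mpr
        intro q hq
        obtain ⟨k, hk, rfl⟩ := (PySem.List.mem_enumerate_iff t 1 q).mp hq
        simp only [decide_eq_true_eq]
        omega
      rw [hself]
      have hmm : (PySem.List.enumerate t 1).map (fun q => [base + q.1 - 1, base + q.1])
          = ((PySem.List.enumerate t 1).map Prod.fst).map (fun i => [base + i - 1, base + i]) := by
        rw [List.map_map]; rfl
      rw [hmm, PySem.List.map_fst_enumerate, PySem.List.pyRange_one, PySem.List.pyRange_one]
      rw [List.map_map, List.map_map]
      have h1 : (1 + (t.length : Int) - 1).toNat = t.length := by omega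
      have h2 : (base + ((t.length : Int) + 1) - 1 - base).toNat = t.length := by omega
      rw [List.length_cons]
      push_cast
      rw [h1, h2]
      apply List.map_congr_left
      intro k _
      simp only [Function.comp_apply]
      simp only [List.cons.injEq]
      exact ⟨by omega, by omega, trivial⟩

theorem pvStep_eq (n : Nat) (p : Int × String)
    (nodes adj : List (List Int)) (maps : List (PySem.Dict Char (List Int)))
    (index : PySem.Dict Char (List (Int × List Int)))
    (hp : p.1 = (maps.length : Int))
    (hidx : ∀ c, index.getD c [] = cIndex maps c) :
    (pvBStep n (nodes, adj, maps, index) p).1 = (pvAStep n (nodes, adj, maps) p).1 ∧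
    (pvBStep n (nodes, adj, maps, index) p).2.1 = (pvAStep n (nodes, adj, maps) p).2.1 ∧
    (pvBStep n (nodes, adj, maps, index) p).2.2.1 = (pvAStep n (nodes, adj, maps) p).2.2 ∧
    (∀ c, (pvBStep n (nodes, adj, maps, index) p).2.2.2.getD c [] =
      cIndex (pvAStep n (nodes, adj, maps) p).2.2 c) := by
  obtain ⟨i, s⟩ := p
  simp only at hp
  simp only [pvBStep, pvAStep]
  have hsplit : (PySem.List.enumerate s.toList 0).foldl
        (fun (t : List (List Int) × List (List Int) × PySem.Dict Char (List Int)) (q : Int × Char) =>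
          (t.1 ++ [PySem.List.pySetD (List.replicate n (0 : Int)) i 1
              ++ [if PySem.Chars.isalpha q.2 then (1 : Int) else 0]],
           (if q.1 ≠ 0 then t.2.1 ++ [[PySem.List.len nodes + q.1 - 1, PySem.List.len nodes + q.1]] else t.2.1),
           t.2.2.modify q.2 [] (· ++ [PySem.List.len nodes + q.1])))
        (nodes, adj, PySem.Dict.empty)
      = ((PySem.List.enumerate s.toList 0).foldl (fun (a : List (List Int)) (q : Int × Char) => a ++ [PySem.List.pySetD (List.replicate n (0 : Int)) i 1
              ++ [if PySem.Chars.isalpha q.2 then (1 : Int) else 0]]) nodes,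
         (PySem.List.enumerate s.toList 0).foldl (fun (b : List (List Int)) (q : Int × Char) => if q.1 ≠ 0 then b ++ [[PySem.List.len nodes + q.1 - 1, PySem.List.len nodes + q.1]] else b) adj,
         (PySem.List.enumerate s.toList 0).foldl (fun (d : PySem.Dict Char (List Int)) (q : Int × Char) => d.modify q.2 [] (· ++ [PySem.List.len nodes + q.1])) PySem.Dict.empty) :=
    fold3_proj (PySem.List.enumerate s.toList 0)
      (fun (a : List (List Int)) (q : Int × Char) => a ++ [PySem.List.pySetD (List.replicate n (0 : Int)) i 1
              ++ [if PySem.Chars.isalpha q.2 then (1 : Int) else 0]])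
      (fun (b : List (List Int)) (q : Int × Char) => if q.1 ≠ 0 then b ++ [[PySem.List.len nodes + q.1 - 1, PySem.List.len nodes + q.1]] else b)
      (fun (d : PySem.Dict Char (List Int)) (q : Int × Char) => d.modify q.2 [] (· ++ [PySem.List.len nodes + q.1]))
      nodes adj PySem.Dict.empty
  rw [hsplit]
  have hdict : (PySem.List.enumerate s.toList 0).foldl
        (fun (d : PySem.Dict Char (List Int)) q => d.modify q.2 [] (· ++ [PySem.List.len nodes + q.1]))
        PySem.Dict.empty
      = (PySem.List.enumerate s.toList (PySem.List.len nodes)).foldl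
        (fun (d : PySem.Dict Char (List Int)) q => d.modify q.2 [] (· ++ [q.1])) PySem.Dict.empty := by
    have hsh := enumerate_shift s.toList (PySem.List.len nodes) 0
    rw [add_zero] at hsh
    rw [hsh, List.foldl_map]
  refine ⟨?_, ?_, ?_, ?_⟩
  · rw [PySem.List.foldl_append_singleton_eq_map]
    have : (PySem.List.enumerate s.toList 0).map
          (fun q => PySem.List.pySetD (List.replicate n (0 : Int)) i 1
            ++ [if PySem.Chars.isalpha q.2 then (1 : Int) else 0])
        = ((PySem.List.enumerate s.toList 0).map Prod.snd).map
          (fun c => PySem.List.pySetD (List.replicate n (0 : Int)) i 1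
            ++ [if PySem.Chars.isalpha c then (1 : Int) else 0]) := by
      rw [List.map_map]; rfl
    rw [this, PySem.List.map_snd_enumerate]
  · rw [PySem.List.foldl_append_ite (fun q : Int × Char => q.1 ≠ 0)
      (fun q => [PySem.List.len nodes + q.1 - 1, PySem.List.len nodes + q.1])]
    rw [PySem.List.foldl_append_singleton_eq_map (fun i : Int => [i, i + 1])]
    have := adj_maps_eq s.toList (PySem.List.len nodes)
    simp only [PySem.List.len_eq] at this ⊢
    simp only [PySem.Str.len_eq]
    rw [this]
  · rw [hdict]
  · intro c
    have hnd : ((PySem.List.enumerate s.toList (PySem.List.len nodes)).foldl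
        (fun (d : PySem.Dict Char (List Int)) q => d.modify q.2 [] (· ++ [q.1]))
        PySem.Dict.empty).keys.Nodup :=
      PySem.Dict.nodup_keys_foldl_modify_key _ Prod.snd [] (fun _ q => (· ++ [q.1]))
        PySem.Dict.empty PySem.Dict.nodup_keys_empty
    rw [hdict]
    set eqm := (PySem.List.enumerate s.toList (PySem.List.len nodes)).foldl
      (fun (d : PySem.Dict Char (List Int)) q => d.modify q.2 [] (· ++ [q.1]))
      PySem.Dict.empty with heqm
    have hfm : eqm.items.foldl (fun ix kv => ix.modify kv.1 [] (· ++ [(i, kv.2)])) index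
        = (eqm.items.map (fun kv => (kv.1, (i, kv.2)))).foldl
          (fun ix pr => ix.modify pr.1 [] (· ++ [pr.2])) index := by
      rw [List.foldl_map]
    rw [hfm, PySem.Dict.getD_foldl_modify_append, List.filter_map]
    have hcomp : eqm.items.filter
          ((fun pr : Char × (Int × List Int) => pr.1 == c) ∘ (fun kv => (kv.1, (i, kv.2))))
        = eqm.items.filter (fun kv => kv.1 == c) := List.filter_congr (fun x _ => rfl)
    rw [hcomp, items_filter_key eqm hnd c [], hidx]
    show _ = cIndex (maps ++ [eqm]) c
    unfold cIndex
    rw [PySem.List.enumerate_append, List.filter_append, List.map_append]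
    congr 1
    by_cases hc : eqm.contains c
    · simp [hc, PySem.List.enumerate_cons, PySem.List.enumerate_nil, hp]
    · simp [hc, PySem.List.enumerate_cons, PySem.List.enumerate_nil]

theorem build_inv (n : Nat) : ∀ (sl : List String) (i : Int)
    (nodes adj : List (List Int)) (maps : List (PySem.Dict Char (List Int)))
    (index : PySem.Dict Char (List (Int × List Int))),
    i = (maps.length : Int) →
    (∀ c, index.getD c [] = cIndex maps c) →
    ((PySem.List.enumerate sl i).foldl (pvBStep n) (nodes, adj, maps, index)).1
      = ((PySem.List.enumerate sl i).foldl (pvAStep n) (nodes, adj, maps)).1 ∧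
    ((PySem.List.enumerate sl i).foldl (pvBStep n) (nodes, adj, maps, index)).2.1
      = ((PySem.List.enumerate sl i).foldl (pvAStep n) (nodes, adj, maps)).2.1 ∧
    ((PySem.List.enumerate sl i).foldl (pvBStep n) (nodes, adj, maps, index)).2.2.1
      = ((PySem.List.enumerate sl i).foldl (pvAStep n) (nodes, adj, maps)).2.2 ∧
    (∀ c, ((PySem.List.enumerate sl i).foldl (pvBStep n) (nodes, adj, maps, index)).2.2.2.getD c [] =
      cIndex ((PySem.List.enumerate sl i).foldl (pvAStep n) (nodes, adj, maps)).2.2 c) ∧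
    ((PySem.List.enumerate sl i).foldl (pvAStep n) (nodes, adj, maps)).2.2.length
      = maps.length + sl.length := by
  intro sl
  induction sl with
  | nil =>
      intro i nodes adj maps index hp hidx
      simp only [PySem.List.enumerate_nil, List.foldl_nil, List.length_nil]
      exact ⟨by first | rfl | trivial, by first | rfl | trivial, by first | rfl | trivial, hidx,
        by omega⟩
  | cons s t ih =>
      intro i nodes adj maps index hp hidx
      rw [PySem.List.enumerate_cons]
      simp only [List.foldl_cons]
      obtain ⟨e1, e2, e3, e4⟩ := pvStep_eq n (i, s) nodes adj maps index hp hidx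
      have hlen1 : (pvAStep n (nodes, adj, maps) (i, s)).2.2.length = maps.length + 1 := by
        simp [pvAStep]
      have hB : pvBStep n (nodes, adj, maps, index) (i, s)
          = ((pvAStep n (nodes, adj, maps) (i, s)).1,
             (pvAStep n (nodes, adj, maps) (i, s)).2.1,
             (pvAStep n (nodes, adj, maps) (i, s)).2.2,
             (pvBStep n (nodes, adj, maps, index) (i, s)).2.2.2) :=
        Prod.ext e1 (Prod.ext e2 (Prod.ext e3 rfl))
      rw [hB]
      obtain ⟨i1, i2, i3, i4, i5⟩ := ih (i + 1) (pvAStep n (nodes, adj, maps) (i, s)).1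
        (pvAStep n (nodes, adj, maps) (i, s)).2.1 (pvAStep n (nodes, adj, maps) (i, s)).2.2
        (pvBStep n (nodes, adj, maps, index) (i, s)).2.2.2
        (by rw [hlen1]; push_cast; omega) e4
      exact ⟨i1, i2, i3, i4, by rw [i5, hlen1]; simp only [List.length_cons]; omega⟩

theorem flatMap_ite_of_filter {α β : Type} (p : α → Bool) (g : α → List β) (l : List α) :
    (l.filter p).flatMap g = l.flatMap (fun x => if p x then g x else []) := by
  induction l with
  | nil => rfl
  | cons x t ih =>
      rw [List.filter_cons]
      by_cases h : p x <;> simp [h, ih]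

theorem filter_of_flatMap {α β : Type} (l : List α) (g : α → List β) (p : β → Bool) :
    (l.flatMap g).filter p = l.flatMap (fun x => (g x).filter p) := by
  induction l with
  | nil => rfl
  | cons x t ih => simp [List.flatMap_cons, List.filter_append, ih]

theorem foldl_of_flatMap {α β γ : Type} (l : List α) (g : α → List β) (f : γ → β → γ) :
    ∀ (init : γ), (l.flatMap g).foldl f init = l.foldl (fun acc x => (g x).foldl f acc) init := by
  induction l with
  | nil => intro init; rfl
  | cons x t ih => intro init; simp only [List.flatMap_cons, List.foldl_append, List.foldl_cons]; exact ih _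

theorem flatMap_congr_mem {α β : Type} (l : List α) (f g : α → List β)
    (h : ∀ x ∈ l, f x = g x) : l.flatMap f = l.flatMap g := by
  induction l with
  | nil => rfl
  | cons x t ih =>
      simp only [List.flatMap_cons]
      rw [h x (by simp), ih (fun y hy => h y (by simp [hy]))]

-- a filter pinning the enumerate counter picks out at most one element
theorem enum_filter_eq {α : Type} (xs : List α) : ∀ (s j : Int) (d : α) (r : Int × α → Bool),
    s ≤ j → j < s + xs.length →
    (PySem.List.enumerate xs s).filter (fun q => r q && decide (q.1 = j))
      = (if r (j, xs.getD (j - s).toNat d) then [(j, xs.getD (j - s).toNat d)] else []) := by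
  induction xs with
  | nil =>
      intro s j d r h1 h2
      simp only [List.length_nil, Nat.cast_zero, add_zero] at h2
      omega
  | cons x t ih =>
      intro s j d r h1 h2
      rw [PySem.List.enumerate_cons, List.filter_cons]
      by_cases hj : j = s
      · subst hj
        have htail : (PySem.List.enumerate t (j + 1)).filter (fun q => r q && decide (q.1 = j)) = [] := by
          rw [List.filter_eq_nil_iff]
          intro q hq
          obtain ⟨k, hk, rfl⟩ := (PySem.List.mem_enumerate_iff t (j + 1) q).mp hq
          simp only [Bool.and_eq_true, decide_eq_true_eq, not_and]
          intro _
          omega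
        have hd0 : (j - j).toNat = 0 := by omega
        rw [htail, hd0]
        by_cases hr : r (j, x) <;> simp [hr]
      · have hdrop : (r (s, x) && decide ((s, x).1 = j)) = false := by
          simp only [Bool.and_eq_false_iff]
          right
          simpa using fun h => hj h.symm
        rw [hdrop]
        simp only [Bool.false_eq_true, if_false]
        have h2' : j < (s + 1) + t.length := by
          simp only [List.length_cons] at h2
          push_cast at h2 ⊢
          omega
        rw [ih (s + 1) j d r (by omega) h2']
        have hk : (j - s).toNat = (j - (s + 1)).toNat + 1 := by omega
        rw [hk, List.getD_cons_succ]

-- slot-update loop: final bucket list, slot by slot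
theorem bucket_char {β : Type} : ∀ (acts : List (Int × List β)) (bk : List (List β)),
    (∀ a ∈ acts, 0 ≤ a.1 ∧ a.1 < (bk.length : Int)) →
    acts.foldl (fun bk a => PySem.List.pySetD bk a.1 (PySem.List.pyGetD bk a.1 [] ++ a.2)) bk
      = (List.range bk.length).map
          (fun b => bk.getD b [] ++ (acts.filter (fun a => a.1 = (b : Int))).flatMap (fun a => a.2)) := by
  intro acts
  induction acts with
  | nil =>
      intro bk _
      simp only [List.foldl_nil, List.filter_nil, List.flatMap_nil, List.append_nil]
      apply List.ext_getElem (by simp)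
      intro i h1 h2
      simp only [List.getElem_map, List.getElem_range]
      rw [List.getD_eq_getElem]
  | cons a acts ih =>
      intro bk hb
      obtain ⟨ha0, ha1⟩ := hb a List.mem_cons_self
      simp only [List.foldl_cons]
      rw [PySem.List.pySetD_of_nonneg bk _ ha0, PySem.List.pyGetD_eq_getElem bk [] ha0 (by simpa using ha1)]
      rw [ih _ (by
        intro x hx
        have := hb x (List.mem_cons_of_mem _ hx)
        simpa using this)]
      rw [List.length_set]
      apply List.map_congr_left
      intro b hbr
      have hbn : b < bk.length := List.mem_range.mp hbr
      have hbset : b < (bk.set a.1.toNat (bk[a.1.toNat] ++ a.2)).length := by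
        simpa using hbn
      rw [List.filter_cons]
      rw [List.getD_eq_getElem _ _ hbset, List.getD_eq_getElem _ _ hbn, List.getElem_set]
      by_cases hab : a.1 = (b : Int)
      · have habn : a.1.toNat = b := by omega
        simp only [hab, decide_true, if_true, List.flatMap_cons, Int.toNat_natCast]
        rw [List.append_assoc]
      · have habn : a.1.toNat ≠ b := by omega
        simp only [hab, decide_false, Bool.false_eq_true, if_false, if_neg habn]

-- the slice of the char index at one string slot
theorem cIndex_pick (maps : List (PySem.Dict Char (List Int))) (c : Char) (b : Nat)
    (hb : b < maps.length) (r : Int → Bool) :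
    (cIndex maps c).filter (fun bw => r bw.1 && decide (bw.1 = (b : Int)))
      = (if maps[b].contains c && r (b : Int) then [((b : Int), maps[b].getD c [])] else []) := by
  unfold cIndex
  rw [List.filter_map]
  have hcomp : ((PySem.List.enumerate maps 0).filter (fun q => q.2.contains c)).filter
        ((fun bw : Int × List Int => r bw.1 && decide (bw.1 = (b : Int))) ∘ (fun q => (q.1, q.2.getD c [])))
      = ((PySem.List.enumerate maps 0).filter (fun q => q.2.contains c)).filter
        (fun q => r q.1 && decide (q.1 = (b : Int))) := List.filter_congr (fun x _ => rfl)
  rw [hcomp, List.filter_filter]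
  have hcomb : (PySem.List.enumerate maps 0).filter
        (fun a => r a.1 && decide (a.1 = (b : Int)) && a.2.contains c)
      = (PySem.List.enumerate maps 0).filter
        (fun q => (fun q : Int × PySem.Dict Char (List Int) => q.2.contains c && r q.1) q
          && decide (q.1 = (b : Int))) := by
    apply List.filter_congr
    intro x _
    cases hx : x.2.contains c <;> cases hr : r x.1 <;> simp [hx, hr]
  rw [hcomb, enum_filter_eq maps 0 (b : Int) PySem.Dict.empty
    (fun q => q.2.contains c && r q.1) (by omega) (by omega)]
  have hg : (((b : Int)) - 0).toNat = b := by omega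
  rw [hg, List.getD_eq_getElem _ _ hb]
  by_cases hcc : maps[b].contains c && r (b : Int)
  · rw [if_pos (by simpa using hcc), if_pos hcc]
    rfl
  · rw [if_neg (by simpa using hcc), if_neg hcc]
    rfl

theorem edges_eq (maps : List (PySem.Dict Char (List Int)))
    (index : PySem.Dict Char (List (Int × List Int))) (n : Nat)
    (hn : maps.length = n)
    (hidx : ∀ c, index.getD c [] = cIndex maps c) :
    ((PySem.List.enumerate maps 0).foldl (fun acc q =>
      let buckets := q.2.items.foldl (fun bk kv =>
          (index.getD kv.1 []).foldl (fun bk bw =>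
            if bw.1 ≠ q.1 then
              PySem.List.pySetD bk bw.1
                (PySem.List.pyGetD bk bw.1 [] ++ kv.2.flatMap (fun i => bw.2.map (fun j => [i, j])))
            else bk) bk)
        (List.replicate n ([] : List (List Int)))
      buckets.foldl (fun acc b => acc ++ b) acc) ([] : List (List Int)))
    = ((PySem.List.enumerate maps 0).foldl (fun acc q1 =>
      (PySem.List.enumerate maps 0).foldl (fun acc q2 =>
        if q1.1 = q2.1 then acc
        else q1.2.items.foldl (fun acc kv =>
          acc ++ kv.2.flatMap (fun i => (q2.2.getD kv.1 []).map (fun j => [i, j]))) acc) acc) []) := by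
  subst hn
  apply PySem.List.foldl_congr_mem'
  intro q hq acc
  simp only []
  -- ---------- B side ----------
  have hbody1 : ∀ (bk : List (List (List Int))) (kv : Char × List Int), kv ∈ q.2.items →
      (index.getD kv.1 []).foldl (fun bk bw =>
        if bw.1 ≠ q.1 then
          PySem.List.pySetD bk bw.1
            (PySem.List.pyGetD bk bw.1 [] ++ kv.2.flatMap (fun i => bw.2.map (fun j => [i, j])))
        else bk) bk
      = ((fun kv : Char × List Int => ((cIndex maps kv.1).filter (fun bw => decide (bw.1 ≠ q.1))).map (fun bw : Int × List Int => (bw.1, kv.2.flatMap (fun i => bw.2.map (fun j => [i, j]))))) kv).foldl (fun bk (a : Int × List (List Int)) => PySem.List.pySetD bk a.1 (PySem.List.pyGetD bk a.1 [] ++ a.2)) bk := by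
    intro bk kv _
    rw [hidx kv.1]
    rw [PySem.List.foldl_ite_eq_foldl_filter (fun bw : Int × List Int => bw.1 ≠ q.1)
      (fun bk bw => PySem.List.pySetD bk bw.1
        (PySem.List.pyGetD bk bw.1 [] ++ kv.2.flatMap (fun i => bw.2.map (fun j => [i, j]))))]
    rw [List.foldl_map]
  have hBfold : q.2.items.foldl (fun bk kv =>
        (index.getD kv.1 []).foldl (fun bk bw =>
          if bw.1 ≠ q.1 then
            PySem.List.pySetD bk bw.1
              (PySem.List.pyGetD bk bw.1 [] ++ kv.2.flatMap (fun i => bw.2.map (fun j => [i, j])))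
          else bk) bk)
        (List.replicate maps.length ([] : List (List Int)))
      = (q.2.items.flatMap (fun kv : Char × List Int => ((cIndex maps kv.1).filter (fun bw => decide (bw.1 ≠ q.1))).map (fun bw : Int × List Int => (bw.1, kv.2.flatMap (fun i => bw.2.map (fun j => [i, j])))))).foldl (fun bk (a : Int × List (List Int)) => PySem.List.pySetD bk a.1 (PySem.List.pyGetD bk a.1 [] ++ a.2))
        (List.replicate maps.length ([] : List (List Int))) := by
    rw [foldl_of_flatMap]
    exact PySem.List.foldl_congr_mem' _ _ _ _ (fun kv hkv bk => hbody1 bk kv hkv)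
  rw [hBfold]
  have hbnd : ∀ a ∈ q.2.items.flatMap (fun kv : Char × List Int => ((cIndex maps kv.1).filter (fun bw => decide (bw.1 ≠ q.1))).map (fun bw : Int × List Int => (bw.1, kv.2.flatMap (fun i => bw.2.map (fun j => [i, j]))))),
      0 ≤ a.1 ∧ a.1 < ((List.replicate maps.length ([] : List (List Int))).length : Int) := by
    intro a ha
    simp only [List.mem_flatMap, List.mem_map, List.mem_filter] at ha
    obtain ⟨kv, _, bw, ⟨hbw, _⟩, rfl⟩ := ha
    unfold cIndex at hbw
    simp only [List.mem_map, List.mem_filter] at hbw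
    obtain ⟨q2, ⟨hq2, _⟩, rfl⟩ := hbw
    obtain ⟨k, hk, rfl⟩ := (PySem.List.mem_enumerate_iff maps 0 q2).mp hq2
    simp only [List.length_replicate]
    constructor <;> [omega; (push_cast; omega)]
  rw [bucket_char _ _ hbnd, List.length_replicate]
  rw [PySem.List.foldl_append_eq_flatten]
  -- ---------- A side ----------
  have hbodyA : ∀ (acc : List (List Int)) (q2 : Int × PySem.Dict Char (List Int)),
      (if q.1 = q2.1 then acc
       else q.2.items.foldl (fun acc kv =>
          acc ++ kv.2.flatMap (fun i => (q2.2.getD kv.1 []).map (fun j => [i, j]))) acc)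
      = (if ¬ (q.1 = q2.1) then
          acc ++ q.2.items.flatMap (fun kv =>
            kv.2.flatMap (fun i => (q2.2.getD kv.1 []).map (fun j => [i, j])))
         else acc) := by
    intro acc q2
    by_cases h : q.1 = q2.1 <;> simp [h, List.flatMap_def]
  rw [PySem.List.foldl_congr_mem' _ _ _ acc (fun q2 _ acc => hbodyA acc q2)]
  rw [PySem.List.foldl_ite_eq_foldl_filter (fun q2 : Int × PySem.Dict Char (List Int) => ¬ (q.1 = q2.1))
    (fun acc q2 => acc ++ q.2.items.flatMap (fun kv =>
      kv.2.flatMap (fun i => (q2.2.getD kv.1 []).map (fun j => [i, j]))))]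
  rw [PySem.List.foldl_append_eq_flatMap]
  rw [flatMap_ite_of_filter]
  congr 1
  -- ---------- the rows agree slot by slot ----------
  have henum : PySem.List.enumerate maps 0
      = (List.range maps.length).map (fun (b : Nat) => ((b : Int), maps.getD b PySem.Dict.empty)) := by
    rw [PySem.List.enumerate_eq_map_pyRange maps PySem.Dict.empty, PySem.List.len_eq,
      PySem.List.pyRange_zero_nat, List.map_map]
    apply List.map_congr_left
    intro k _
    simp [PySem.List.pyGetD_natCast]
  rw [henum, List.flatMap_map]
  have hflat : ((List.range maps.length).map
        (fun b => (List.replicate maps.length ([] : List (List Int))).getD b [] ++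
          ((q.2.items.flatMap (fun kv : Char × List Int => ((cIndex maps kv.1).filter (fun bw => decide (bw.1 ≠ q.1))).map (fun bw : Int × List Int => (bw.1, kv.2.flatMap (fun i => bw.2.map (fun j => [i, j])))))).filter (fun a => decide (a.1 = (b : Int)))).flatMap
            (fun a => a.2))).flatten
      = (List.range maps.length).flatMap
        (fun (b : Nat) => ((q.2.items.flatMap (fun kv : Char × List Int => ((cIndex maps kv.1).filter (fun bw => decide (bw.1 ≠ q.1))).map (fun bw : Int × List Int => (bw.1, kv.2.flatMap (fun i => bw.2.map (fun j => [i, j])))))).filter (fun a => decide (a.1 = (b : Int)))).flatMap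
            (fun a => a.2)) := by
    rw [← List.flatMap_def]
    apply flatMap_congr_mem
    intro b hbr
    have hbL : b < maps.length := List.mem_range.mp hbr
    rw [List.getD_eq_getElem _ _ (by simpa using hbL), List.getElem_replicate, List.nil_append]
  rw [hflat]
  apply flatMap_congr_mem
  intro b hbr
  have hbL : b < maps.length := List.mem_range.mp hbr
  rw [filter_of_flatMap, List.flatMap_assoc]
  simp only []
  by_cases hqb : q.1 = (b : Int)
  · rw [if_neg (by simpa using hqb)]
    rw [List.flatMap_eq_nil_iff]
    intro kv _
    have hfe : (((cIndex maps kv.1).filter (fun bw => decide (bw.1 ≠ q.1))).map (fun bw : Int × List Int => (bw.1, kv.2.flatMap (fun i => bw.2.map (fun j => [i, j]))))).filter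
        (fun a => decide (a.1 = (b : Int))) = [] := by
      rw [List.filter_eq_nil_iff]
      intro a ha
      simp only [List.mem_map, List.mem_filter] at ha
      obtain ⟨bw, ⟨_, hne⟩, rfl⟩ := ha
      simp only [decide_eq_true_eq] at hne ⊢
      omega
    rw [hfe]
    rfl
  · rw [if_pos (by simpa using hqb)]
    apply flatMap_congr_mem
    intro kv hkv
    rw [List.filter_map]
    have hc1 : ((cIndex maps kv.1).filter (fun bw => decide (bw.1 ≠ q.1))).filter
          ((fun a : Int × List (List Int) => decide (a.1 = (b : Int))) ∘ (fun bw : Int × List Int => (bw.1, kv.2.flatMap (fun i => bw.2.map (fun j => [i, j])))))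
        = ((cIndex maps kv.1).filter (fun bw => decide (bw.1 ≠ q.1))).filter
          (fun bw => decide (bw.1 = (b : Int))) := List.filter_congr (fun x _ => rfl)
    rw [hc1, List.filter_filter]
    have hc2 : (cIndex maps kv.1).filter (fun a => decide (a.1 = (b : Int)) && decide (a.1 ≠ q.1))
        = (cIndex maps kv.1).filter (fun bw => (fun z : Int => decide (z ≠ q.1)) bw.1
            && decide (bw.1 = (b : Int))) :=
      List.filter_congr (fun x _ => by
        cases h1 : decide (x.1 = (b : Int)) <;> cases h2 : decide (x.1 ≠ q.1) <;> simp [h2])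
    rw [hc2, cIndex_pick maps kv.1 b hbL (fun z => decide (z ≠ q.1))]
    have hbq' : decide ((b : Int) ≠ q.1) = true := by simp; omega
    have hgd : maps.getD b PySem.Dict.empty = maps[b] := List.getD_eq_getElem _ _ hbL
    by_cases hcont : maps[b].contains kv.1
    · simp only [hcont, hbq', Bool.and_self, if_true, List.map_cons, List.map_nil,
        List.flatMap_cons, List.flatMap_nil, List.append_nil, hgd]
    · have hcf : maps[b].contains kv.1 = false := by simpa using hcont
      simp only [hcf, Bool.false_and, Bool.false_eq_true, if_false, List.map_nil,
        List.flatMap_nil, hgd]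
      rw [PySem.Dict.getD_of_not_contains _ _ hcf]
      simp

-- ===== VERDICT (by name: the statement is the Claim_ definition above) =====
theorem encode_strings_as_graphs_spec : Claim_equal_encode_strings_as_graphs := by
  intro strlist _
  show _ = _
  unfold encode_strings_as_graphs encode_strings_as_graphs_alt
  have h := build_inv strlist.length strlist 0 [] [] [] PySem.Dict.empty (by simp)
    (by intro c; simp [cIndex, PySem.List.enumerate_nil, PySem.Dict.getD_empty])
  obtain ⟨h1, h2, h3, h4, h5⟩ := h
  simp only [h1, h2, h3]
  refine Prod.ext rfl (Prod.ext rfl ?_)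
  show _ = _
  rw [edges_eq _ _ strlist.length (by simpa using h5) (by intro c; exact h4 c)]
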